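-- pv_equiv track=rewrite | github.com/EdsonEddy/scsc | notebooks/datasets/small/729318.py | dfs
-- ===== SOURCE A (Python) =====
-- movimientos = [(-1, 0), (1, 0), (0, -1), (0, 1)]
--
-- def dfs(mapa, visitado, x, y):
--     if x < 0 or x >= len(mapa) or y < 0 or y >= len(mapa[0]) or visitado[x][y] or mapa[x][y] == '#':
--         return 0
--     visitado[x][y] = True
--     contador = 1
--     for dx, dy in movimientos:
--         contador += dfs(mapa, visitado, x + dx, y + dy)
--
--     return contador
-- ===== SOURCE B (Python) =====
-- movimientos = [(-1, 0), (1, 0), (0, -1), (0, 1)]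
--
-- def dfs(mapa, visitado, x, y):
--     contador = 0
--     stack = [(x, y)]
--     while stack:
--         cx, cy = stack.pop()
--         if cx < 0 or cx >= len(mapa) or cy < 0 or cy >= len(mapa[0]) or visitado[cx][cy] or mapa[cx][cy] == '#':
--             continue
--         visitado[cx][cy] = True
--         contador += 1
--         for dx, dy in reversed(movimientos):
--             stack.append((cx + dx, cy + dy))
--     return contador
-- ===== Notes on version B (the rewrite author's own statement) =====
-- stated objective: alternative
-- what changed: Replaces the recursive DFS with an iterative flood-fill over an explicit stack (mark-and-count on pop, neighbors pushed in reversed order), removing Python call-stack recursion.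
-- outside the precondition, e.g. on dfs([['#'], []], [[False]], 0, 0): A returns 0, B returns 0
import Mathlib
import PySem

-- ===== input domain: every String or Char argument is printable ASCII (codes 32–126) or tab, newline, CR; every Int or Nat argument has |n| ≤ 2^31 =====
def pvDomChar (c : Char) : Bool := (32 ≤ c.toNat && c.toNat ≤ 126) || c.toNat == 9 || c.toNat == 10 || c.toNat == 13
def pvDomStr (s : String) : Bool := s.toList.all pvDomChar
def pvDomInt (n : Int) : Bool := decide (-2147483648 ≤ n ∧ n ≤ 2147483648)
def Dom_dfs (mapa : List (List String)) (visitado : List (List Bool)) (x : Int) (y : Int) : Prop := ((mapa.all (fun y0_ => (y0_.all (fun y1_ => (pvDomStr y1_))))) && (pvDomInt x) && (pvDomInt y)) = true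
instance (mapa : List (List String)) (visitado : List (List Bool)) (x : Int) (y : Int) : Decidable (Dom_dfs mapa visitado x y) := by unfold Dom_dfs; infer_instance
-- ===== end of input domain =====

-- B replaces A's recursive DFS by an iterative explicit-stack flood fill (mark-and-count on pop,
-- neighbors pushed in reversed order); the equivalence proved is about the RETURN value — both
-- Pythons also mutate `visitado` in place, marking the same cells.

-- Shared primitive helpers (the guard, the mark, the count of unvisited cells used as fuel).
-- Python's `visitado[x][y]` / `mapa[x][y]` are read only after the guard ensured 0 ≤ x, y,
-- x < len(mapa) and y < len(mapa[0]); under Pre_dfs those indices are then in range for the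
-- getD below, so the defaults are never taken (out-of-shape inputs, where Python raises with
-- IndexError, are excluded by Pre_dfs).
def pvVisGet (v : List (List Bool)) (x y : Int) : Bool := (v.getD x.toNat []).getD y.toNat false
def pvMapGet (m : List (List String)) (x y : Int) : String := (m.getD x.toNat []).getD y.toNat ""
-- the if-condition of A, identically the continue-condition of B
def pvSkip (m : List (List String)) (v : List (List Bool)) (x y : Int) : Bool :=
  decide (x < 0) || decide ((m.length : Int) ≤ x) || decide (y < 0) ||
  decide (((m.headD []).length : Int) ≤ y) || pvVisGet v x y || (pvMapGet m x y == "#")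
-- `visitado[x][y] = True`
def pvMark (v : List (List Bool)) (x y : Int) : List (List Bool) :=
  v.modify x.toNat (fun row => row.set y.toNat true)
-- number of still-unvisited cells: drives the fuel that makes both ports total
def pvF (v : List (List Bool)) : Nat := (v.map (fun row => row.count false)).sum
-- movimientos = [(-1, 0), (1, 0), (0, -1), (0, 1)]
def pvMovs : List (Int × Int) := [(-1, 0), (1, 0), (0, -1), (0, 1)]

-- ===== PORT A =====
-- A's recursive DFS, with the mutated `visitado` threaded explicitly and returned alongside the
-- count; the fuel argument pvF+1 only makes the recursion total — under Pre_dfs it never runs out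
-- (every recursive call happens after one more cell was marked visited).
def dfsGo (mapa : List (List String)) : Nat → List (List Bool) → Int → Int → Int × List (List Bool)
  | 0, v, _, _ => (0, v)
  | f + 1, v, x, y =>
    if pvSkip mapa v x y then (0, v)
    else
      pvMovs.foldl (fun p d =>
        let r := dfsGo mapa f p.2 (x + d.1) (y + d.2)
        (p.1 + r.1, r.2)) (1, pvMark v x y)

def dfs (mapa : List (List String)) (visitado : List (List Bool)) (x : Int) (y : Int) : Int :=
  (dfsGo mapa (pvF visitado + 1) visitado x y).1

-- ===== PORT B =====
-- B's iterative flood fill with an explicit stack; the list head is the stack top (Python's list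
-- end), so Python's `for d in reversed(movimientos): stack.append(...)` becomes prepending the
-- movimientos-order neighbor list. The fuel 4*pvF+2 only makes the while-loop total — each
-- iteration pops one entry, and at most pvF pops push 4 new ones.
def dfsLoop (mapa : List (List String)) : Nat → List (Int × Int) → List (List Bool) → Int → Int × List (List Bool)
  | 0, _, v, c => (c, v)
  | _ + 1, [], v, c => (c, v)
  | f + 1, (x, y) :: s, v, c =>
    if pvSkip mapa v x y then dfsLoop mapa f s v c
    else dfsLoop mapa f (pvMovs.map (fun d => (x + d.1, y + d.2)) ++ s) (pvMark v x y) (c + 1)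

def dfs_alt (mapa : List (List String)) (visitado : List (List Bool)) (x : Int) (y : Int) : Int :=
  (dfsLoop mapa (4 * pvF visitado + 2) [(x, y)] visitado 0).1

-- ===== PRECONDITION & SPEC =====
-- Pre_dfs: the inputs on which Python A returns normally: either the start coordinate is
-- rejected by the short-circuiting guard before any list is indexed (x out of range; or, with
-- mapa non-empty, y out of range of len(mapa[0])), or the grids are well-shaped for the flood
-- fill: mapa non-empty, every mapa row at least as long as mapa[0], and visitado covering the
-- len(mapa) × len(mapa[0]) region. Pre_ also excludes some ragged/short grids whose start cell
-- is immediately rejected as wall or already-visited — there A happens to return 0 before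
-- reaching the malformed region (see claim.json "cites").
def Pre_dfs (mapa : List (List String)) (visitado : List (List Bool)) (x : Int) (y : Int) : Prop :=
  (x < 0 ∨ (mapa.length : Int) ≤ x) ∨
  (mapa ≠ [] ∧ (y < 0 ∨ ((mapa.headD []).length : Int) ≤ y)) ∨
  (mapa ≠ [] ∧
   (∀ row ∈ mapa, (mapa.headD []).length ≤ row.length) ∧
   mapa.length ≤ visitado.length ∧
   (∀ i, i < mapa.length → (mapa.headD []).length ≤ (visitado.getD i []).length))
instance (mapa : List (List String)) (visitado : List (List Bool)) (x : Int) (y : Int) : Decidable (Pre_dfs mapa visitado x y) := by unfold Pre_dfs; infer_instance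

def pvWitness_dfs : List (List String) × List (List Bool) × Int × Int :=
  ([[".", "#"], [".", "."]], [[false, false], [false, false]], 0, 0)

def Spec_dfs (mapa : List (List String)) (visitado : List (List Bool)) (x : Int) (y : Int) (out : Int) : Prop := out = dfs_alt mapa visitado x y
instance (mapa : List (List String)) (visitado : List (List Bool)) (x : Int) (y : Int) (out : Int) : Decidable (Spec_dfs mapa visitado x y out) := by unfold Spec_dfs; infer_instance

-- ===== CLAIM (what is proved, stated in full; the proofs are below) =====
def Claim_equal_dfs : Prop := ∀ (mapa : List (List String)) (visitado : List (List Bool)) (x : Int) (y : Int), Dom_dfs mapa visitado x y → Pre_dfs mapa visitado x y → Spec_dfs mapa visitado x y (dfs mapa visitado x y)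

-- ===== LEMMAS AND PROOFS =====

-- the shape invariant the loop maintains (the x,y-independent part of Pre_dfs)
def pvShape (mapa : List (List String)) (v : List (List Bool)) : Prop :=
  mapa.length ≤ v.length ∧
  ∀ i, i < mapa.length → (mapa.headD []).length ≤ (v.getD i []).length

theorem len_getD_mark (v : List (List Bool)) (i0 i j : Nat) :
    ((v.modify i0 (fun r => r.set j true)).getD i []).length = (v.getD i []).length := by
  simp only [List.getD_eq_getElem?_getD, List.getElem?_modify]
  cases h : v[i]? with
  | none => simp
  | some r => simp; split <;> simp

theorem pvShape_mark {mapa : List (List String)} {v : List (List Bool)} (x y : Int)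
    (h : pvShape mapa v) : pvShape mapa (pvMark v x y) := by
  refine ⟨?_, ?_⟩
  · simpa [pvMark] using h.1
  · intro i hi
    rw [pvMark, len_getD_mark]
    exact h.2 i hi
theorem row_set (l : List Bool) (j : Nat) (h : j < l.length) (hf : l.getD j false = false) :
    (l.set j true).count false + 1 = l.count false := by
  simp [List.getD_eq_getElem?_getD, List.getElem?_eq_getElem h] at hf
  rw [List.count_set h]
  simp [hf]
  have : 1 ≤ List.count false l := by
    rw [List.one_le_count_iff]
    exact hf ▸ List.getElem_mem h
  omega

theorem F_mark : ∀ (v : List (List Bool)) (i j : Nat), i < v.length →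
    j < (v.getD i []).length → (v.getD i []).getD j false = false →
    pvF (v.modify i (fun row => row.set j true)) + 1 = pvF v
  | [], i, j, hi, _, _ => absurd hi (by simp)
  | a :: t, 0, j, hi, hj, hf => by
    simp [List.getD] at hj hf
    simp [pvF, List.modify]
    have := row_set a j hj hf
    omega
  | a :: t, i + 1, j, hi, hj, hf => by
    simp at hi
    have := F_mark t i j hi (by simpa [List.getD] using hj) (by simpa [List.getD] using hf)
    simp [pvF, List.modify] at this ⊢
    omega

theorem pvSkip_false {mapa : List (List String)} {v : List (List Bool)} {x y : Int}
    (h : pvSkip mapa v x y = false) :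
    0 ≤ x ∧ x < (mapa.length : Int) ∧ 0 ≤ y ∧ y < ((mapa.headD []).length : Int) ∧
    (v.getD x.toNat []).getD y.toNat false = false := by
  simp [pvSkip] at h
  exact ⟨h.1.1.1.1.1, h.1.1.1.1.2, h.1.1.1.2, by simpa [List.headD_eq_head?_getD] using h.1.1.2, h.1.2⟩

theorem pvMark_F {mapa : List (List String)} {v : List (List Bool)} {x y : Int}
    (hs : pvShape mapa v) (hg : pvSkip mapa v x y = false) :
    pvF (pvMark v x y) + 1 = pvF v := by
  obtain ⟨hx0, hxH, hy0, hyW, hvis⟩ := pvSkip_false hg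
  have hi : x.toNat < v.length := by
    have := hs.1; omega
  have hiH : x.toNat < mapa.length := by omega
  have hj : y.toNat < (v.getD x.toNat []).length := by
    have := hs.2 x.toNat hiH; omega
  exact F_mark v x.toNat y.toNat hi hj hvis
theorem dfsGo_mono (mapa : List (List String)) :
    ∀ (f : Nat) (v : List (List Bool)) (x y : Int), pvShape mapa v →
      pvShape mapa (dfsGo mapa f v x y).2 ∧ pvF (dfsGo mapa f v x y).2 ≤ pvF v
  | 0, v, x, y, hs => by simp only [dfsGo]; exact ⟨hs, le_refl _⟩
  | f + 1, v, x, y, hs => by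
    by_cases hg : pvSkip mapa v x y
    · simp [dfsGo, hg]
      exact ⟨hs.1, hs.2⟩
    · have hF := pvMark_F hs (by simpa using hg)
      obtain ⟨s1, m1⟩ := dfsGo_mono mapa f (pvMark v x y) (x + (-1)) (y + 0) (pvShape_mark x y hs)
      obtain ⟨s2, m2⟩ := dfsGo_mono mapa f _ (x + 1) (y + 0) s1
      obtain ⟨s3, m3⟩ := dfsGo_mono mapa f _ (x + 0) (y + (-1)) s2
      obtain ⟨s4, m4⟩ := dfsGo_mono mapa f _ (x + 0) (y + 1) s3
      simp only [dfsGo, if_neg hg, pvMovs, List.foldl]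
      exact ⟨s4, by omega⟩
theorem dfsGo_eq (mapa : List (List String)) (f : Nat) (v : List (List Bool)) (x y : Int) :
    dfsGo mapa (f + 1) v x y =
      if pvSkip mapa v x y then (0, v)
      else
        pvMovs.foldl (fun p d =>
          let r := dfsGo mapa f p.2 (x + d.1) (y + d.2)
          (p.1 + r.1, r.2)) (1, pvMark v x y) := rfl

theorem dfsGo_succ (mapa : List (List String)) :
    ∀ (f : Nat) (v : List (List Bool)) (x y : Int), pvShape mapa v → pvF v < f →
      dfsGo mapa (f + 1) v x y = dfsGo mapa f v x y
  | 0, v, x, y, _, hf => absurd hf (by omega)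
  | f + 1, v, x, y, hs, hf => by
    by_cases hg : pvSkip mapa v x y
    · rw [dfsGo_eq mapa (f + 1), dfsGo_eq mapa f, if_pos hg, if_pos hg]
    · have hF := pvMark_F hs (by simpa using hg)
      have hm1 := pvShape_mark (mapa := mapa) x y hs
      obtain ⟨s1, m1⟩ := dfsGo_mono mapa f (pvMark v x y) (x + (-1)) (y + 0) hm1
      obtain ⟨s2, m2⟩ := dfsGo_mono mapa f _ (x + 1) (y + 0) s1
      obtain ⟨s3, m3⟩ := dfsGo_mono mapa f _ (x + 0) (y + (-1)) s2
      have e1 := dfsGo_succ mapa f (pvMark v x y) (x + (-1)) (y + 0) hm1 (by omega)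
      have e2 := dfsGo_succ mapa f _ (x + 1) (y + 0) s1 (by omega)
      have e3 := dfsGo_succ mapa f _ (x + 0) (y + (-1)) s2 (by omega)
      have e4 := dfsGo_succ mapa f _ (x + 0) (y + 1) s3 (by omega)
      rw [dfsGo_eq mapa (f + 1), dfsGo_eq mapa f, if_neg hg, if_neg hg]
      simp only [pvMovs, List.foldl]
      rw [e1, e2, e3, e4]

theorem dfsGo_add (mapa : List (List String)) :
    ∀ (k f : Nat) (v : List (List Bool)) (x y : Int), pvShape mapa v → pvF v < f →
      dfsGo mapa (f + k) v x y = dfsGo mapa f v x y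
  | 0, f, v, x, y, _, _ => rfl
  | k + 1, f, v, x, y, hs, hf => by
    have : f + (k + 1) = (f + k) + 1 := by omega
    rw [this, dfsGo_succ mapa (f + k) v x y hs (by omega), dfsGo_add mapa k f v x y hs hf]

theorem dfsGo_fuel (mapa : List (List String)) (f g : Nat) (v : List (List Bool)) (x y : Int)
    (hs : pvShape mapa v) (hf : pvF v < f) (hg : pvF v < g) :
    dfsGo mapa f v x y = dfsGo mapa g v x y := by
  rcases le_total f g with h | h
  · rw [show g = f + (g - f) by omega, dfsGo_add mapa (g - f) f v x y hs hf]
  · rw [show f = g + (f - g) by omega, dfsGo_add mapa (f - g) g v x y hs hg]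
theorem dfsLoop_nil (mapa : List (List String)) (f : Nat) (v : List (List Bool)) (c : Int) :
    dfsLoop mapa f [] v c = (c, v) := by cases f <;> rfl


def pvGA (mapa : List (List String)) (v : List (List Bool)) (x y : Int) : Int × List (List Bool) :=
  dfsGo mapa (pvF v + 1) v x y
def pvGB (mapa : List (List String)) (s : List (Int × Int)) (v : List (List Bool)) (c : Int) :
    Int × List (List Bool) :=
  dfsLoop mapa (s.length + 4 * pvF v + 1) s v c

theorem dfsLoop_cons (mapa : List (List String)) (f : Nat) (x y : Int) (s : List (Int × Int))
    (v : List (List Bool)) (c : Int) :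
    dfsLoop mapa (f + 1) ((x, y) :: s) v c =
      if pvSkip mapa v x y then dfsLoop mapa f s v c
      else dfsLoop mapa f (pvMovs.map (fun d => (x + d.1, y + d.2)) ++ s) (pvMark v x y) (c + 1) := rfl

theorem pvMain (mapa : List (List String)) :
    ∀ (n : Nat) (v : List (List Bool)) (x y : Int) (s : List (Int × Int)) (c : Int),
      pvShape mapa v → pvF v = n →
      pvGB mapa ((x, y) :: s) v c = pvGB mapa s (pvGA mapa v x y).2 (c + (pvGA mapa v x y).1) := by
  intro n
  induction n using Nat.strong_induction_on with
  | _ n ih =>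
    intro v x y s c hs hn
    by_cases hg : pvSkip mapa v x y
    · have hA : pvGA mapa v x y = (0, v) := by rw [pvGA, dfsGo_eq, if_pos hg]
      rw [hA]
      simp only [pvGB, List.length_cons]
      rw [show s.length + 1 + 4 * pvF v + 1 = (s.length + 4 * pvF v + 1) + 1 from by omega]
      rw [dfsLoop_cons, if_pos hg, add_zero]
    · have hgf : pvSkip mapa v x y = false := by simpa using hg
      have hF := pvMark_F hs hgf
      have hm1 := pvShape_mark (mapa := mapa) x y hs
      have step : pvGB mapa ((x, y) :: s) v c =
          pvGB mapa (pvMovs.map (fun d => (x + d.1, y + d.2)) ++ s) (pvMark v x y) (c + 1) := by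
        simp only [pvGB, List.length_cons, List.length_append, List.length_map]
        rw [show s.length + 1 + 4 * pvF v + 1 = (s.length + 1 + 4 * pvF v) + 1 from rfl]
        rw [dfsLoop_cons, if_neg hg]
        congr 1
        · simp [pvMovs]; omega
      rw [step]
      simp only [pvMovs, List.map, List.cons_append, List.nil_append]
      have i1 := ih (pvF (pvMark v x y)) (by omega) (pvMark v x y) (x + (-1)) (y + 0)
        ((x + 1, y + 0) :: (x + 0, y + (-1)) :: (x + 0, y + 1) :: s) (c + 1) hm1 rfl
      rw [i1]
      have hw1s : pvShape mapa (pvGA mapa (pvMark v x y) (x + (-1)) (y + 0)).2 :=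
        (dfsGo_mono mapa (pvF (pvMark v x y) + 1) (pvMark v x y) (x + (-1)) (y + 0) hm1).1
      have hw1f : pvF (pvGA mapa (pvMark v x y) (x + (-1)) (y + 0)).2 ≤ pvF (pvMark v x y) :=
        (dfsGo_mono mapa (pvF (pvMark v x y) + 1) (pvMark v x y) (x + (-1)) (y + 0) hm1).2
      have i2 := ih (pvF (pvGA mapa (pvMark v x y) (x + (-1)) (y + 0)).2) (by omega) (pvGA mapa (pvMark v x y) (x + (-1)) (y + 0)).2 (x + 1) (y + 0)
        ((x + 0, y + (-1)) :: (x + 0, y + 1) :: s) (c + 1 + (pvGA mapa (pvMark v x y) (x + (-1)) (y + 0)).1) hw1s rfl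
      rw [i2]
      have hw2s : pvShape mapa (pvGA mapa (pvGA mapa (pvMark v x y) (x + (-1)) (y + 0)).2 (x + 1) (y + 0)).2 :=
        (dfsGo_mono mapa (pvF (pvGA mapa (pvMark v x y) (x + (-1)) (y + 0)).2 + 1) (pvGA mapa (pvMark v x y) (x + (-1)) (y + 0)).2 (x + 1) (y + 0) hw1s).1
      have hw2f : pvF (pvGA mapa (pvGA mapa (pvMark v x y) (x + (-1)) (y + 0)).2 (x + 1) (y + 0)).2 ≤ pvF (pvGA mapa (pvMark v x y) (x + (-1)) (y + 0)).2 :=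
        (dfsGo_mono mapa (pvF (pvGA mapa (pvMark v x y) (x + (-1)) (y + 0)).2 + 1) (pvGA mapa (pvMark v x y) (x + (-1)) (y + 0)).2 (x + 1) (y + 0) hw1s).2
      have i3 := ih (pvF (pvGA mapa (pvGA mapa (pvMark v x y) (x + (-1)) (y + 0)).2 (x + 1) (y + 0)).2) (by omega) (pvGA mapa (pvGA mapa (pvMark v x y) (x + (-1)) (y + 0)).2 (x + 1) (y + 0)).2 (x + 0) (y + (-1))
        ((x + 0, y + 1) :: s) (c + 1 + (pvGA mapa (pvMark v x y) (x + (-1)) (y + 0)).1 + (pvGA mapa (pvGA mapa (pvMark v x y) (x + (-1)) (y + 0)).2 (x + 1) (y + 0)).1) hw2s rfl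
      rw [i3]
      have hw3s : pvShape mapa (pvGA mapa (pvGA mapa (pvGA mapa (pvMark v x y) (x + (-1)) (y + 0)).2 (x + 1) (y + 0)).2 (x + 0) (y + (-1))).2 :=
        (dfsGo_mono mapa (pvF (pvGA mapa (pvGA mapa (pvMark v x y) (x + (-1)) (y + 0)).2 (x + 1) (y + 0)).2 + 1) (pvGA mapa (pvGA mapa (pvMark v x y) (x + (-1)) (y + 0)).2 (x + 1) (y + 0)).2 (x + 0) (y + (-1)) hw2s).1
      have hw3f : pvF (pvGA mapa (pvGA mapa (pvGA mapa (pvMark v x y) (x + (-1)) (y + 0)).2 (x + 1) (y + 0)).2 (x + 0) (y + (-1))).2 ≤ pvF (pvGA mapa (pvGA mapa (pvMark v x y) (x + (-1)) (y + 0)).2 (x + 1) (y + 0)).2 :=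
        (dfsGo_mono mapa (pvF (pvGA mapa (pvGA mapa (pvMark v x y) (x + (-1)) (y + 0)).2 (x + 1) (y + 0)).2 + 1) (pvGA mapa (pvGA mapa (pvMark v x y) (x + (-1)) (y + 0)).2 (x + 1) (y + 0)).2 (x + 0) (y + (-1)) hw2s).2
      have i4 := ih (pvF (pvGA mapa (pvGA mapa (pvGA mapa (pvMark v x y) (x + (-1)) (y + 0)).2 (x + 1) (y + 0)).2 (x + 0) (y + (-1))).2) (by omega) (pvGA mapa (pvGA mapa (pvGA mapa (pvMark v x y) (x + (-1)) (y + 0)).2 (x + 1) (y + 0)).2 (x + 0) (y + (-1))).2 (x + 0) (y + 1)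
        s (c + 1 + (pvGA mapa (pvMark v x y) (x + (-1)) (y + 0)).1 + (pvGA mapa (pvGA mapa (pvMark v x y) (x + (-1)) (y + 0)).2 (x + 1) (y + 0)).1 + (pvGA mapa (pvGA mapa (pvGA mapa (pvMark v x y) (x + (-1)) (y + 0)).2 (x + 1) (y + 0)).2 (x + 0) (y + (-1))).1) hw3s rfl
      rw [i4]
      have hd1f : pvF (dfsGo mapa (pvF (pvMark v x y) + 1) (pvMark v x y) (x + (-1)) (y + 0)).2 ≤ pvF (pvMark v x y) := hw1f
      have hd2f : pvF (dfsGo mapa (pvF (dfsGo mapa (pvF (pvMark v x y) + 1) (pvMark v x y) (x + (-1)) (y + 0)).2 + 1) (dfsGo mapa (pvF (pvMark v x y) + 1) (pvMark v x y) (x + (-1)) (y + 0)).2 (x + 1) (y + 0)).2 ≤ pvF (dfsGo mapa (pvF (pvMark v x y) + 1) (pvMark v x y) (x + (-1)) (y + 0)).2 := hw2f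
      have hd3f : pvF (dfsGo mapa (pvF (dfsGo mapa (pvF (dfsGo mapa (pvF (pvMark v x y) + 1) (pvMark v x y) (x + (-1)) (y + 0)).2 + 1) (dfsGo mapa (pvF (pvMark v x y) + 1) (pvMark v x y) (x + (-1)) (y + 0)).2 (x + 1) (y + 0)).2 + 1) (dfsGo mapa (pvF (dfsGo mapa (pvF (pvMark v x y) + 1) (pvMark v x y) (x + (-1)) (y + 0)).2 + 1) (dfsGo mapa (pvF (pvMark v x y) + 1) (pvMark v x y) (x + (-1)) (y + 0)).2 (x + 1) (y + 0)).2 (x + 0) (y + (-1))).2 ≤ pvF (dfsGo mapa (pvF (dfsGo mapa (pvF (pvMark v x y) + 1) (pvMark v x y) (x + (-1)) (y + 0)).2 + 1) (dfsGo mapa (pvF (pvMark v x y) + 1) (pvMark v x y) (x + (-1)) (y + 0)).2 (x + 1) (y + 0)).2 := hw3f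
      have e1 : dfsGo mapa (pvF v) (pvMark v x y) (x + (-1)) (y + 0) =
          dfsGo mapa (pvF (pvMark v x y) + 1) (pvMark v x y) (x + (-1)) (y + 0) :=
        dfsGo_fuel mapa _ _ _ _ _ hm1 (by omega) (by omega)
      have e2 : dfsGo mapa (pvF v) (dfsGo mapa (pvF (pvMark v x y) + 1) (pvMark v x y) (x + (-1)) (y + 0)).2 (x + 1) (y + 0) =
          dfsGo mapa (pvF (dfsGo mapa (pvF (pvMark v x y) + 1) (pvMark v x y) (x + (-1)) (y + 0)).2 + 1) (dfsGo mapa (pvF (pvMark v x y) + 1) (pvMark v x y) (x + (-1)) (y + 0)).2 (x + 1) (y + 0) :=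
        dfsGo_fuel mapa _ _ _ _ _ hw1s (by omega) (by omega)
      have e3 : dfsGo mapa (pvF v) (dfsGo mapa (pvF (dfsGo mapa (pvF (pvMark v x y) + 1) (pvMark v x y) (x + (-1)) (y + 0)).2 + 1) (dfsGo mapa (pvF (pvMark v x y) + 1) (pvMark v x y) (x + (-1)) (y + 0)).2 (x + 1) (y + 0)).2 (x + 0) (y + (-1)) =
          dfsGo mapa (pvF (dfsGo mapa (pvF (dfsGo mapa (pvF (pvMark v x y) + 1) (pvMark v x y) (x + (-1)) (y + 0)).2 + 1) (dfsGo mapa (pvF (pvMark v x y) + 1) (pvMark v x y) (x + (-1)) (y + 0)).2 (x + 1) (y + 0)).2 + 1) (dfsGo mapa (pvF (dfsGo mapa (pvF (pvMark v x y) + 1) (pvMark v x y) (x + (-1)) (y + 0)).2 + 1) (dfsGo mapa (pvF (pvMark v x y) + 1) (pvMark v x y) (x + (-1)) (y + 0)).2 (x + 1) (y + 0)).2 (x + 0) (y + (-1)) :=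
        dfsGo_fuel mapa _ _ _ _ _ hw2s (by omega) (by omega)
      have e4 : dfsGo mapa (pvF v) (dfsGo mapa (pvF (dfsGo mapa (pvF (dfsGo mapa (pvF (pvMark v x y) + 1) (pvMark v x y) (x + (-1)) (y + 0)).2 + 1) (dfsGo mapa (pvF (pvMark v x y) + 1) (pvMark v x y) (x + (-1)) (y + 0)).2 (x + 1) (y + 0)).2 + 1) (dfsGo mapa (pvF (dfsGo mapa (pvF (pvMark v x y) + 1) (pvMark v x y) (x + (-1)) (y + 0)).2 + 1) (dfsGo mapa (pvF (pvMark v x y) + 1) (pvMark v x y) (x + (-1)) (y + 0)).2 (x + 1) (y + 0)).2 (x + 0) (y + (-1))).2 (x + 0) (y + 1) =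
          dfsGo mapa (pvF (dfsGo mapa (pvF (dfsGo mapa (pvF (dfsGo mapa (pvF (pvMark v x y) + 1) (pvMark v x y) (x + (-1)) (y + 0)).2 + 1) (dfsGo mapa (pvF (pvMark v x y) + 1) (pvMark v x y) (x + (-1)) (y + 0)).2 (x + 1) (y + 0)).2 + 1) (dfsGo mapa (pvF (dfsGo mapa (pvF (pvMark v x y) + 1) (pvMark v x y) (x + (-1)) (y + 0)).2 + 1) (dfsGo mapa (pvF (pvMark v x y) + 1) (pvMark v x y) (x + (-1)) (y + 0)).2 (x + 1) (y + 0)).2 (x + 0) (y + (-1))).2 + 1) (dfsGo mapa (pvF (dfsGo mapa (pvF (dfsGo mapa (pvF (pvMark v x y) + 1) (pvMark v x y) (x + (-1)) (y + 0)).2 + 1) (dfsGo mapa (pvF (pvMark v x y) + 1) (pvMark v x y) (x + (-1)) (y + 0)).2 (x + 1) (y + 0)).2 + 1) (dfsGo mapa (pvF (dfsGo mapa (pvF (pvMark v x y) + 1) (pvMark v x y) (x + (-1)) (y + 0)).2 + 1) (dfsGo mapa (pvF (pvMark v x y) + 1) (pvMark v x y) (x + (-1)) (y + 0)).2 (x +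 1) (y + 0)).2 (x + 0) (y + (-1))).2 (x + 0) (y + 1) :=
        dfsGo_fuel mapa _ _ _ _ _ hw3s (by omega) (by omega)
      have hA : pvGA mapa v x y =
          (1 + (pvGA mapa (pvMark v x y) (x + (-1)) (y + 0)).1 + (pvGA mapa (pvGA mapa (pvMark v x y) (x + (-1)) (y + 0)).2 (x + 1) (y + 0)).1 + (pvGA mapa (pvGA mapa (pvGA mapa (pvMark v x y) (x + (-1)) (y + 0)).2 (x + 1) (y + 0)).2 (x + 0) (y + (-1))).1 + (pvGA mapa (pvGA mapa (pvGA mapa (pvGA mapa (pvMark v x y) (x + (-1)) (y + 0)).2 (x + 1) (y + 0)).2 (x + 0) (y + (-1))).2 (x + 0) (y + 1)).1, (pvGA mapa (pvGA mapa (pvGA mapa (pvGA mapa (pvMark v x y) (x + (-1)) (y + 0)).2 (x + 1) (y + 0)).2 (x + 0) (y + (-1))).2 (x + 0) (y + 1)).2) := by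
        simp only [pvGA]
        rw [dfsGo_eq mapa (pvF v), if_neg hg]
        simp only [pvMovs, List.foldl]
        rw [e1, e2, e3, e4]
      rw [hA]
      congr 1
      ring



-- ===== VERDICT (by name: the statement is the Claim_ definition above) =====
theorem dfs_spec : Claim_equal_dfs := by
  intro mapa visitado x y _ hpre
  show dfs mapa visitado x y = dfs_alt mapa visitado x y
  by_cases hg : pvSkip mapa visitado x y
  · -- the popped start cell is rejected by the guard: both sides return 0
    show (dfsGo mapa (pvF visitado + 1) visitado x y).1 = _
    rw [dfsGo_eq, if_pos hg]
    show (0 : Int) = (dfsLoop mapa ((4 * pvF visitado + 1) + 1) [(x, y)] visitado 0).1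
    rw [dfsLoop_cons, if_pos hg, dfsLoop_nil]
  · -- the flood fill runs: Pre_'s out-of-range disjuncts contradict ¬pvSkip, leaving the shape
    obtain ⟨hx0, hxH, hy0, hyW, -⟩ := pvSkip_false (by simpa using hg)
    have hs : pvShape mapa visitado := by
      unfold Pre_dfs at hpre
      rcases hpre with (h | h) | (⟨-, (h | h)⟩ | h)
      · omega
      · omega
      · omega
      · omega
      · exact ⟨h.2.2.1, h.2.2.2⟩
    have halt : dfs_alt mapa visitado x y = (pvGB mapa [(x, y)] visitado 0).1 := by
      simp only [dfs_alt, pvGB, List.length_cons, List.length_nil]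
      rw [show (0 : Nat) + 1 + 4 * pvF visitado + 1 = 4 * pvF visitado + 2 from by omega]
    rw [halt, pvMain mapa (pvF visitado) visitado x y [] 0 hs rfl]
    simp only [pvGB, dfsLoop_nil]
    rw [zero_add]
    rfl
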